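-- pv_equiv track=rewrite | github.com/PedroMTQ/mantis | mantis/src/consensus.py | sort_ref_files_and_hits
-- ===== SOURCE A (Python) =====
-- def sort_ref_files_and_hits(ref_files_consensus, ref_names_consensus):
--     res = {}
--     for i in range(len(ref_files_consensus)):
--         r_file = ref_files_consensus[i]
--         if r_file not in res: res[r_file] = set()
--         res[r_file].add(ref_names_consensus[i])
--     ref_files = []
--     ref_hits = []
--
--     for r_file in sorted(res):
--         for r_hit in sorted(res[r_file]):
--             ref_files.append(r_file)
--             ref_hits.append(r_hit)
--
--     ref_files = ';'.join(ref_files)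
--     ref_hits = ';'.join(ref_hits)
--     return ref_files, ref_hits
-- ===== SOURCE B (Python) =====
-- def sort_ref_files_and_hits(ref_files_consensus, ref_names_consensus):
--     pairs = sorted(set(zip(ref_files_consensus, ref_names_consensus)))
--     return ';'.join(p[0] for p in pairs), ';'.join(p[1] for p in pairs)
-- ===== Notes on version B (the rewrite author's own statement) =====
-- stated objective: simpler
-- what changed: Replaces A's dict-of-sets grouping followed by nested sorted loops with one flat deduplicated set of (file, name) pairs sorted lexicographically, whose two projections are joined directly.
import Mathlib
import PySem

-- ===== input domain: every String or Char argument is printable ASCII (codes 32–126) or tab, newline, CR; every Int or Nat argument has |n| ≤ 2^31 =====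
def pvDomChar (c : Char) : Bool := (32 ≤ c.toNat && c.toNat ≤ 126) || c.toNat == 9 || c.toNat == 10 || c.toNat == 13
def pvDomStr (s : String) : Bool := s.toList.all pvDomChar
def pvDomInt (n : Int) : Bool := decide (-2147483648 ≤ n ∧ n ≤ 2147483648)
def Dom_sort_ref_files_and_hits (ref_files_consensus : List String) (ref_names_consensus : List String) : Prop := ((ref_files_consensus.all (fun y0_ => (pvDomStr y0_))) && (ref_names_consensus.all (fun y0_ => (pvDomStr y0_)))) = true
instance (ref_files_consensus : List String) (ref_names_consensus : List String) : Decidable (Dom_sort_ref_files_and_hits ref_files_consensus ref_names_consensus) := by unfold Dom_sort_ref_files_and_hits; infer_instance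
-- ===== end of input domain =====

-- B replaces A's dict-of-sets grouping and nested sorted loops by one flat deduplicated
-- collection of (file, name) pairs sorted lexicographically (objective: simpler).

-- ===== PORT A =====
def sort_ref_files_and_hits (ref_files_consensus : List String) (ref_names_consensus : List String) : String × String :=
  let res : PySem.Dict String (PySem.Set String) :=
    (PySem.List.pyRange 0 (ref_files_consensus.length : Int) 1).foldl
      (fun res i =>
        let r_file := PySem.List.pyGetD ref_files_consensus i ""
        let res := if res.contains r_file then res else res.insert r_file PySem.Set.empty
        res.modify r_file PySem.Set.empty
          (fun s => PySem.Set.add s (PySem.List.pyGetD ref_names_consensus i "")))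
      PySem.Dict.empty
  let lists : List String × List String :=
    (PySem.List.sorted res.keys (fun x => x) false).foldl
      (fun acc r_file =>
        (PySem.List.sorted (res.getD r_file PySem.Set.empty) (fun x => x) false).foldl
          (fun acc r_hit => (acc.1 ++ [r_file], acc.2 ++ [r_hit])) acc)
      ([], [])
  (PySem.Str.join ";" lists.1, PySem.Str.join ";" lists.2)

-- ===== PORT B =====
def sort_ref_files_and_hits_alt (ref_files_consensus : List String) (ref_names_consensus : List String) : String × String :=
  let pairs := PySem.List.sorted2 (PySem.Set.ofList (ref_files_consensus.zip ref_names_consensus))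
      (fun p => p.1) (fun p => p.2) false
  (PySem.Str.join ";" (pairs.map (fun p => p.1)), PySem.Str.join ";" (pairs.map (fun p => p.2)))

-- ===== PRECONDITION & SPEC =====
-- Pre_ excludes only the inputs where the names list is shorter than the files list:
-- there A raises IndexError at ref_names_consensus[i].
def Pre_sort_ref_files_and_hits (ref_files_consensus : List String) (ref_names_consensus : List String) : Prop :=
  ref_files_consensus.length ≤ ref_names_consensus.length
instance (ref_files_consensus : List String) (ref_names_consensus : List String) : Decidable (Pre_sort_ref_files_and_hits ref_files_consensus ref_names_consensus) := by unfold Pre_sort_ref_files_and_hits; infer_instance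

def pvWitness_sort_ref_files_and_hits : List String × List String :=
  (["f2", "f1", "f1", "f2"], ["n1", "n2", "n1", "n1"])

def Spec_sort_ref_files_and_hits (ref_files_consensus : List String) (ref_names_consensus : List String) (out : String × String) : Prop := out = sort_ref_files_and_hits_alt ref_files_consensus ref_names_consensus
instance (ref_files_consensus : List String) (ref_names_consensus : List String) (out : String × String) : Decidable (Spec_sort_ref_files_and_hits ref_files_consensus ref_names_consensus out) := by unfold Spec_sort_ref_files_and_hits; infer_instance

-- ===== CLAIM (what is proved, stated in full; the proofs are below) =====
def Claim_equal_sort_ref_files_and_hits : Prop := ∀ (ref_files_consensus : List String) (ref_names_consensus : List String), Dom_sort_ref_files_and_hits ref_files_consensus ref_names_consensus → Pre_sort_ref_files_and_hits ref_files_consensus ref_names_consensus → Spec_sort_ref_files_and_hits ref_files_consensus ref_names_consensus (sort_ref_files_and_hits ref_files_consensus ref_names_consensus)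


-- ===== LEMMAS AND PROOFS =====

-- the zip-level grouping step A's index loop performs
def pvStep (d : PySem.Dict String (PySem.Set String)) (p : String × String) : PySem.Dict String (PySem.Set String) :=
  let d1 := if d.contains p.1 then d else d.insert p.1 PySem.Set.empty
  d1.modify p.1 PySem.Set.empty (fun s => PySem.Set.add s p.2)

def pvGroup (ps : List (String × String)) (f : String) : PySem.Set String :=
  PySem.Set.ofList ((ps.filter (fun p => p.1 == f)).map (fun p => p.2))

def pvKeysSorted (ps : List (String × String)) : List String :=
  PySem.List.sorted (PySem.Set.ofList (ps.map (fun p => p.1))) (fun x => x) false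

def pvL (ps : List (String × String)) : List (String × String) :=
  (pvKeysSorted ps).flatMap
    (fun f => (PySem.List.sorted (pvGroup ps f) (fun x => x) false).map (fun h => (f, h)))

-- strict lexicographic order on string pairs
def pvLex (a b : String × String) : Prop := a.1 < b.1 ∨ (a.1 = b.1 ∧ a.2 < b.2)

-- the boolean comparator sorted2 uses
def pvBefore (a b : String × String) : Bool :=
  decide (a.1 < b.1) || (!decide (b.1 < a.1) && decide (a.2 < b.2))

-- ---------- order facts ----------

theorem pv_before_iff (a b : String × String) : pvBefore a b = true ↔ pvLex a b := by
  unfold pvBefore pvLex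
  simp only [Bool.or_eq_true, Bool.and_eq_true, Bool.not_eq_eq_eq_not, Bool.not_true,
    decide_eq_true_iff, decide_eq_false_iff_not]
  constructor
  · rintro (h | ⟨h1, h2⟩)
    · exact Or.inl h
    · rcases lt_trichotomy a.1 b.1 with h' | h' | h'
      · exact Or.inl h'
      · exact Or.inr ⟨h', h2⟩
      · exact absurd h' h1
  · rintro (h | ⟨h1, h2⟩)
    · exact Or.inl h
    · exact Or.inr ⟨by rw [h1]; exact lt_irrefl _, h2⟩

theorem pv_lex_asymm {a b : String × String} (h : pvLex a b) : ¬ pvLex b a := by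
  rcases h with h | ⟨e, h⟩ <;> rintro (h' | ⟨e', h'⟩)
  · exact lt_asymm h h'
  · rw [e'] at h; exact lt_irrefl _ h
  · rw [e] at h'; exact lt_irrefl _ h'
  · exact lt_asymm h h'

theorem pv_lex_trans {a b c : String × String} (h1 : pvLex a b) (h2 : pvLex b c) : pvLex a c := by
  rcases h1 with h1 | ⟨e1, h1⟩ <;> rcases h2 with h2 | ⟨e2, h2⟩
  · exact Or.inl (lt_trans h1 h2)
  · exact Or.inl (e2 ▸ h1)
  · exact Or.inl (e1 ▸ h2)
  · exact Or.inr ⟨e1.trans e2, lt_trans h1 h2⟩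

theorem pv_lex_conn {a b : String × String} (h1 : ¬ pvLex a b) (h2 : ¬ pvLex b a) : a = b := by
  unfold pvLex at h1 h2
  push Not at h1 h2
  have e1 : a.1 = b.1 := by
    rcases lt_trichotomy a.1 b.1 with h | h | h
    · exact absurd h h1.1
    · exact h
    · exact absurd h h2.1
  have e2 : a.2 = b.2 := by
    rcases lt_trichotomy a.2 b.2 with h | h | h
    · exact absurd h (h1.2 e1)
    · exact h
    · exact absurd h (h2.2 e1.symm)
  exact Prod.ext e1 e2

theorem pv_lex_ne {a b : String × String} (h : pvLex a b) : a ≠ b := by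
  rintro rfl
  exact pv_lex_asymm h h

-- ---------- the index loop is the zip loop ----------

theorem pv_foldl_range_nat {δ : Type} (g : δ → String → String → δ) :
    ∀ (fs ns : List String), fs.length ≤ ns.length → ∀ (init : δ),
    (List.range fs.length).foldl
      (fun d (k : Nat) => g d (PySem.List.pyGetD fs ((k : Nat) : Int) "") (PySem.List.pyGetD ns ((k : Nat) : Int) "")) init
    = (fs.zip ns).foldl (fun d p => g d p.1 p.2) init := by
  intro fs
  induction fs with
  | nil => intro ns h init; simp
  | cons f fs ih =>
    intro ns h init
    cases ns with
    | nil => simp at h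
    | cons nm ns =>
      have hlen : fs.length ≤ ns.length := by simpa using h
      rw [List.length_cons, List.range_succ_eq_map, List.foldl_cons, List.foldl_map]
      have h0 : PySem.List.pyGetD (f :: fs) ((0 : Nat) : Int) "" = f := by
        rw [PySem.List.pyGetD_natCast]; rfl
      have h0' : PySem.List.pyGetD (nm :: ns) ((0 : Nat) : Int) "" = nm := by
        rw [PySem.List.pyGetD_natCast]; rfl
      rw [h0, h0']
      have hfun : (fun (d : δ) (k : Nat) =>
            g d (PySem.List.pyGetD (f :: fs) ((Nat.succ k : Nat) : Int) "")
                (PySem.List.pyGetD (nm :: ns) ((Nat.succ k : Nat) : Int) ""))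
          = (fun (d : δ) (k : Nat) =>
            g d (PySem.List.pyGetD fs ((k : Nat) : Int) "") (PySem.List.pyGetD ns ((k : Nat) : Int) "")) := by
        funext d k
        rw [PySem.List.pyGetD_natCast, PySem.List.pyGetD_natCast,
          PySem.List.pyGetD_natCast, PySem.List.pyGetD_natCast]
        simp [Nat.succ_eq_add_one]
      rw [hfun, List.zip_cons_cons, List.foldl_cons]
      exact ih ns hlen (g init f nm)

theorem pv_res_eq (fs ns : List String) (h : fs.length ≤ ns.length) :
    (PySem.List.pyRange 0 (fs.length : Int) 1).foldl
      (fun res i =>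
        let r_file := PySem.List.pyGetD fs i ""
        let res := if res.contains r_file then res else res.insert r_file PySem.Set.empty
        res.modify r_file PySem.Set.empty
          (fun s => PySem.Set.add s (PySem.List.pyGetD ns i "")))
      PySem.Dict.empty
    = (fs.zip ns).foldl pvStep PySem.Dict.empty := by
  rw [PySem.List.pyRange_one, List.foldl_map]
  have ht : ((fs.length : Int) - 0).toNat = fs.length := by omega
  rw [ht]
  have := pv_foldl_range_nat (fun d a b => pvStep d (a, b)) fs ns h PySem.Dict.empty
  simp only [zero_add] at this ⊢
  exact this

-- ---------- the dict after the loop ----------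

theorem pv_step_eq_insert (d : PySem.Dict String (PySem.Set String)) (p : String × String) :
    pvStep d p = d.insert p.1 (PySem.Set.add (d.getD p.1 PySem.Set.empty) p.2) := by
  unfold pvStep PySem.Dict.modify
  by_cases hc : d.contains p.1
  · simp [hc]
  · have hnc : d.contains p.1 = false := by simpa using hc
    have hget : d.get? p.1 = none := (PySem.Dict.get?_eq_none_iff_contains d p.1).mpr hnc
    simp only [hc, Bool.false_eq_true, reduceIte]
    rw [PySem.Dict.getD_insert_self, PySem.Dict.insert_insert_self,
      PySem.Dict.getD_eq_get?_getD, hget]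
    rfl

theorem pv_keys_fold (ps : List (String × String)) :
    ((ps.foldl pvStep PySem.Dict.empty).keys) = PySem.Set.ofList (ps.map (fun p => p.1)) := by
  have h1 : ps.foldl pvStep (PySem.Dict.empty : PySem.Dict String (PySem.Set String))
      = ps.foldl (fun d p => d.insert p.1 (PySem.Set.add (d.getD p.1 PySem.Set.empty) p.2))
          PySem.Dict.empty := by
    apply PySem.List.foldl_congr_mem
    intro acc x _
    exact pv_step_eq_insert acc x
  rw [h1, PySem.Dict.keys_foldl_insert_key]
  simp [PySem.Dict.keys_empty, PySem.Set.update, PySem.Set.ofList, PySem.Set.empty]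

theorem pv_getD_step (d : PySem.Dict String (PySem.Set String)) (p : String × String) (f : String) :
    (pvStep d p).getD f PySem.Set.empty
    = if f = p.1 then PySem.Set.add (d.getD p.1 PySem.Set.empty) p.2
      else d.getD f PySem.Set.empty := by
  rw [pv_step_eq_insert, PySem.Dict.getD_insert]

theorem pv_getD_fold :
    ∀ (ps : List (String × String)) (d : PySem.Dict String (PySem.Set String)) (f : String),
    (ps.foldl pvStep d).getD f PySem.Set.empty
    = PySem.Set.update (d.getD f PySem.Set.empty)
        ((ps.filter (fun p => p.1 == f)).map (fun p => p.2)) := by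
  intro ps
  induction ps with
  | nil => intro d f; simp [PySem.Set.update]
  | cons p ps ih =>
    intro d f
    rw [List.foldl_cons, ih]
    by_cases hpf : p.1 = f
    · have hb : (p.1 == f) = true := by simpa using hpf
      rw [List.filter_cons, if_pos hb, List.map_cons]
      rw [pv_getD_step, if_pos hpf.symm]
      simp [PySem.Set.update, hpf]
    · have hb : ¬ ((p.1 == f) = true) := by simpa using hpf
      rw [List.filter_cons, if_neg hb]
      rw [pv_getD_step, if_neg (fun e => hpf e.symm)]

theorem pv_group_eq (ps : List (String × String)) (f : String) :
    (ps.foldl pvStep PySem.Dict.empty).getD f PySem.Set.empty = pvGroup ps f := by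
  rw [pv_getD_fold, PySem.Dict.getD_empty]
  simp [pvGroup, PySem.Set.update, PySem.Set.ofList, PySem.Set.empty]

-- ---------- the nested append loops ----------

theorem pv_inner (f : String) :
    ∀ (l : List String) (acc : List String × List String),
    l.foldl (fun acc h => (acc.1 ++ [f], acc.2 ++ [h])) acc
    = (acc.1 ++ l.map (fun _ => f), acc.2 ++ l) := by
  intro l
  induction l with
  | nil => intro acc; simp
  | cons x l ih => intro acc; rw [List.foldl_cons, ih]; simp

theorem pv_outer (u v : String → List String) :
    ∀ (K : List String) (a b : List String),
    K.foldl (fun acc f => (acc.1 ++ u f, acc.2 ++ v f)) (a, b)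
    = (a ++ K.flatMap u, b ++ K.flatMap v) := by
  intro K
  induction K with
  | nil => intro a b; simp
  | cons f K ih => intro a b; rw [List.foldl_cons, ih]; simp

-- ---------- pvL: membership, ordering, nodup ----------

theorem pv_mem_L (ps : List (String × String)) (x : String × String) :
    x ∈ pvL ps ↔ x ∈ ps := by
  unfold pvL pvKeysSorted pvGroup
  simp only [List.mem_flatMap, List.mem_map, PySem.List.mem_sorted, PySem.Set.mem_ofList,
    List.mem_filter, beq_iff_eq]
  constructor
  · rintro ⟨f, hf, h, ⟨⟨p, ⟨hp, hpf⟩, hph⟩, rfl⟩⟩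
    have : (f, h) = p := by
      cases p; cases hpf; cases hph; rfl
    rw [this]; exact hp
  · intro hx
    refine ⟨x.1, ⟨x, hx, rfl⟩, x.2, ⟨⟨x, ⟨hx, rfl⟩, rfl⟩, rfl⟩⟩

theorem pv_pairwise_flatMap {α β : Type} (R : β → β → Prop) (l : List α) (f : α → List β)
    (hin : ∀ a ∈ l, (f a).Pairwise R)
    (hcross : l.Pairwise (fun a b => ∀ x ∈ f a, ∀ y ∈ f b, R x y)) :
    (l.flatMap f).Pairwise R := by
  induction l with
  | nil => simp
  | cons a l ih =>
    rw [List.flatMap_cons]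
    obtain ⟨hc, ht⟩ := List.pairwise_cons.mp hcross
    apply List.pairwise_append.mpr
    refine ⟨hin a (by simp), ih (fun b hb => hin b (by simp [hb])) ht, ?_⟩
    intro x hx y hy
    obtain ⟨b, hb, hyb⟩ := List.mem_flatMap.mp hy
    exact hc b hb x hx y hyb

theorem pv_pairwise_L (ps : List (String × String)) : (pvL ps).Pairwise pvLex := by
  unfold pvL
  apply pv_pairwise_flatMap
  · intro f _
    apply List.pairwise_map.mpr
    have := PySem.List.sorted_ofList_pairwise_lt
      ((ps.filter (fun p => p.1 == f)).map (fun p => p.2))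
    exact this.imp (fun h => Or.inr ⟨rfl, h⟩)
  · unfold pvKeysSorted
    have := PySem.List.sorted_ofList_pairwise_lt (ps.map (fun p => p.1))
    apply this.imp
    intro f1 f2 h12 x hx y hy
    obtain ⟨hx1, _, rfl⟩ := List.mem_map.mp hx
    obtain ⟨hy1, _, rfl⟩ := List.mem_map.mp hy
    exact Or.inl h12

theorem pv_nodup_L (ps : List (String × String)) : (pvL ps).Nodup :=
  (pv_pairwise_L ps).imp (fun h => pv_lex_ne h)

-- ---------- sorted2 = pvL ----------

theorem pv_insertBy_pairwise (x : String × String) :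
    ∀ (ys : List (String × String)), ys.Pairwise (fun a b => ¬ pvLex b a) →
    (PySem.List.insertBy pvBefore x ys).Pairwise (fun a b => ¬ pvLex b a) := by
  intro ys
  induction ys with
  | nil => intro _; simp [PySem.List.insertBy]
  | cons y ys ih =>
    intro h
    obtain ⟨hy, hys⟩ := List.pairwise_cons.mp h
    rw [show PySem.List.insertBy pvBefore x (y :: ys)
        = if pvBefore x y = true then x :: y :: ys else y :: PySem.List.insertBy pvBefore x ys
      from rfl]
    by_cases hxy : pvBefore x y = true
    · rw [if_pos hxy]
      have hlxy : pvLex x y := (pv_before_iff x y).mp hxy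
      apply List.pairwise_cons.mpr
      refine ⟨?_, h⟩
      intro b hb
      rcases List.mem_cons.mp hb with rfl | hb'
      · exact pv_lex_asymm hlxy
      · intro hbx; exact hy b hb' (pv_lex_trans hbx hlxy)
    · rw [if_neg hxy]
      apply List.pairwise_cons.mpr
      constructor
      · intro b hb
        rcases (PySem.List.mem_insertBy _ _ _ _).mp hb with rfl | hb'
        · intro hlex; exact hxy ((pv_before_iff _ _).mpr hlex)
        · exact hy b hb'
      · exact ih hys

theorem pv_sorted2_pairwise (xs : List (String × String)) :
    (PySem.List.sorted2 xs (fun p => p.1) (fun p => p.2) false).Pairwise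
      (fun a b => ¬ pvLex b a) := by
  have hdef : PySem.List.sorted2 xs (fun p => p.1) (fun p => p.2) false
      = xs.foldl (fun acc x => PySem.List.insertBy pvBefore x acc) [] := rfl
  rw [hdef]
  have aux : ∀ (l acc : List (String × String)), acc.Pairwise (fun a b => ¬ pvLex b a) →
      (l.foldl (fun acc x => PySem.List.insertBy pvBefore x acc) acc).Pairwise
        (fun a b => ¬ pvLex b a) := by
    intro l
    induction l with
    | nil => intro acc h; exact h
    | cons x l ih => intro acc h; exact ih _ (pv_insertBy_pairwise x acc h)
  exact aux xs [] (by simp)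

theorem pv_sorted2_eq_L (ps : List (String × String)) :
    PySem.List.sorted2 (PySem.Set.ofList ps) (fun p => p.1) (fun p => p.2) false = pvL ps := by
  have hperm : (PySem.List.sorted2 (PySem.Set.ofList ps) (fun p => p.1) (fun p => p.2) false).Perm
      (pvL ps) := by
    refine (PySem.List.sorted2_perm _ _ _ _).trans ?_
    exact (List.perm_ext_iff_of_nodup (PySem.Set.nodup_ofList ps) (pv_nodup_L ps)).mpr
      (fun a => (PySem.Set.mem_ofList ps a).trans (pv_mem_L ps a).symm)
  refine List.Perm.eq_of_pairwise ?_ (pv_sorted2_pairwise _)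
    ((pv_pairwise_L ps).imp (fun h => pv_lex_asymm h)) hperm
  intro a b _ _ h1 h2
  exact pv_lex_conn h2 h1

-- ---------- projections of pvL ----------

theorem pv_map_fst_L (ps : List (String × String)) :
    (pvL ps).map (fun p => p.1)
    = (pvKeysSorted ps).flatMap
        (fun f => (PySem.List.sorted (pvGroup ps f) (fun x => x) false).map (fun _ => f)) := by
  simp [pvL, List.map_flatMap, List.map_map]

theorem pv_map_snd_L (ps : List (String × String)) :
    (pvL ps).map (fun p => p.2)
    = (pvKeysSorted ps).flatMap
        (fun f => PySem.List.sorted (pvGroup ps f) (fun x => x) false) := by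
  simp [pvL, List.map_flatMap, List.map_map]

-- ===== VERDICT (by name: the statement is the Claim_ definition above) =====
theorem sort_ref_files_and_hits_spec : Claim_equal_sort_ref_files_and_hits := by
  intro fs ns _ hpre
  unfold Spec_sort_ref_files_and_hits
  unfold sort_ref_files_and_hits sort_ref_files_and_hits_alt
  simp only [pv_res_eq fs ns hpre, pv_keys_fold, pv_group_eq, pv_sorted2_eq_L]
  simp only [pv_inner, pv_outer, List.nil_append]
  rw [pv_map_fst_L, pv_map_snd_L]
  rfl
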